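-- pv_equiv track=rewrite | github.com/ChristianJaspert/Masterthesis2.0 | utils/functions.py | th_method_AUROC
-- ===== SOURCE A (Python) =====
-- def th_method_AUROC(prediction_actual_list):
--     '''
--     input: list with entrys in format:[prediction,actual]
--     with 0=good, 1=anomaly
--     output ROC value
--     '''
--     rocdata=[]
--     tp=0
--     fp=0
--     for i in range(len(prediction_actual_list)):
--         if prediction_actual_list[i][0]==1 and prediction_actual_list[i][1]==1:
--             tp+=1
--         elif prediction_actual_list[i][0]==1 and prediction_actual_list[i][1]==0:
--             fp+=1
--         rocdata.append([tp,fp])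
--
--
--
--     return rocdata
-- ===== SOURCE B (Python) =====
-- def th_method_AUROC(prediction_actual_list):
--     '''
--     Divide-and-conquer: solve each half independently (counts starting from
--     zero), then shift the right half's results by the left half's final
--     totals.  Correct because cumulative counts over a concatenation are the
--     left counts followed by the right counts offset by the left totals.
--     '''
--     n = len(prediction_actual_list)
--     if n == 0:
--         return []
--     if n == 1:
--         e = prediction_actual_list[0]
--         tp = 1 if e[0] == 1 and e[1] == 1 else 0
--         fp = 1 if e[0] == 1 and e[1] == 0 else 0
--         return [[tp, fp]]
--     mid = n // 2
--     left = th_method_AUROC(prediction_actual_list[:mid])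
--     right = th_method_AUROC(prediction_actual_list[mid:])
--     tl, fl = left[-1]
--     return left + [[tp + tl, fp + fl] for tp, fp in right]
-- ===== Notes on version B (the rewrite author's own statement) =====
-- stated objective: alternative
-- what changed: Replaces A's single left-to-right accumulating loop by a divide-and-conquer recursion: solve each half of the list independently from zero counts, then shift the right half's results by the left half's final totals.
import Mathlib
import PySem

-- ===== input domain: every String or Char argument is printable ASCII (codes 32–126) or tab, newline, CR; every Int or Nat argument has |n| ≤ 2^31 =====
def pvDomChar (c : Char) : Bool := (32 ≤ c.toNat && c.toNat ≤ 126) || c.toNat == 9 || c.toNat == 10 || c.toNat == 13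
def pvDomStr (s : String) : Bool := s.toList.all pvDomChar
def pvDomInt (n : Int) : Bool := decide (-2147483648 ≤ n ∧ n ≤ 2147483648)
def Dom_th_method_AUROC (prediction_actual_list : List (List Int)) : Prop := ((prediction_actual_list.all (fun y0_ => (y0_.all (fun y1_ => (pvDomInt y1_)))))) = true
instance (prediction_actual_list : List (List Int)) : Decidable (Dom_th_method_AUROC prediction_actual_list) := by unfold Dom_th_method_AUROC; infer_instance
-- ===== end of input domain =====

-- B replaces A's single accumulating loop by divide-and-conquer (solve halves from zero, shift the right half by the left totals); alternative structure, not faster. Pre_ excludes the inputs where the Python raises IndexError.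


-- ===== PORT A =====
-- for i in range(len(l)): if l[i][0]==1 and l[i][1]==1: tp+=1 elif l[i][0]==1 and l[i][1]==0: fp+=1 ; rocdata.append([tp,fp])
-- pyGetD with an unused default stands for pyGet?: Pre_ excludes exactly the inputs where Python's indexing raises IndexError.
def th_method_AUROC (prediction_actual_list : List (List Int)) : List (List Int) :=
  ((PySem.List.pyRange 0 (PySem.List.len prediction_actual_list) 1).foldl
    (fun (st : List (List Int) × Int × Int) i =>
      if PySem.List.pyGetD (PySem.List.pyGetD prediction_actual_list i []) 0 0 = 1 ∧
         PySem.List.pyGetD (PySem.List.pyGetD prediction_actual_list i []) 1 0 = 1 then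
        (st.1 ++ [[st.2.1 + 1, st.2.2]], st.2.1 + 1, st.2.2)
      else if PySem.List.pyGetD (PySem.List.pyGetD prediction_actual_list i []) 0 0 = 1 ∧
              PySem.List.pyGetD (PySem.List.pyGetD prediction_actual_list i []) 1 0 = 0 then
        (st.1 ++ [[st.2.1, st.2.2 + 1]], st.2.1, st.2.2 + 1)
      else
        (st.1 ++ [[st.2.1, st.2.2]], st.2.1, st.2.2))
    ([], 0, 0)).1

-- ===== PORT B =====
-- Divide and conquer over slices: n==0 → []; n==1 → one [tp,fp] pair; otherwise
-- left = solve(l[:mid]); right = solve(l[mid:]); tl,fl = left[-1]; left + [[tp+tl,fp+fl] for tp,fp in right].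
def th_method_AUROC_alt (prediction_actual_list : List (List Int)) : List (List Int) :=
  let n : Int := PySem.List.len prediction_actual_list
  if _h0 : n = 0 then []
  else if _h1 : n = 1 then
    let e := PySem.List.pyGetD prediction_actual_list 0 []
    let tp : Int := if PySem.List.pyGetD e 0 0 = 1 ∧ PySem.List.pyGetD e 1 0 = 1 then 1 else 0
    let fp : Int := if PySem.List.pyGetD e 0 0 = 1 ∧ PySem.List.pyGetD e 1 0 = 0 then 1 else 0
    [[tp, fp]]
  else
    let mid := PySem.Int.floordiv n 2
    let left := th_method_AUROC_alt (PySem.List.slice prediction_actual_list none (some mid))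
    let right := th_method_AUROC_alt (PySem.List.slice prediction_actual_list (some mid) none)
    let lastp := PySem.List.pyGetD left (-1) []
    let tl := PySem.List.pyGetD lastp 0 0
    let fl := PySem.List.pyGetD lastp 1 0
    left ++ right.map (fun p => [PySem.List.pyGetD p 0 0 + tl, PySem.List.pyGetD p 1 0 + fl])
termination_by prediction_actual_list.length
decreasing_by
  · have hlen : 2 ≤ prediction_actual_list.length := by
      have h0' : PySem.List.len prediction_actual_list ≠ 0 := _h0
      have h1' : PySem.List.len prediction_actual_list ≠ 1 := _h1
      simp only [PySem.List.len_eq] at h0' h1'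
      omega
    have : PySem.Int.floordiv (PySem.List.len prediction_actual_list) 2
        = ((prediction_actual_list.length / 2 : Nat) : Int) := by
      simpa [PySem.List.len] using
        (PySem.Int.floordiv_natCast prediction_actual_list.length 2)
    rw [this, PySem.List.slice_to_natCast]
    exact lt_of_le_of_lt (List.length_take_le _ _) (by omega)
  · have hlen : 2 ≤ prediction_actual_list.length := by
      have h0' : PySem.List.len prediction_actual_list ≠ 0 := _h0
      have h1' : PySem.List.len prediction_actual_list ≠ 1 := _h1
      simp only [PySem.List.len_eq] at h0' h1'
      omega
    have : PySem.Int.floordiv (PySem.List.len prediction_actual_list) 2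
        = ((prediction_actual_list.length / 2 : Nat) : Int) := by
      simpa [PySem.List.len] using
        (PySem.Int.floordiv_natCast prediction_actual_list.length 2)
    rw [this, PySem.List.slice_from_natCast]
    rw [List.length_drop]
    omega

-- ===== PRECONDITION & SPEC =====
-- Pre_ excludes exactly the inputs where Python raises IndexError (in A and in B alike): an empty
-- entry, or an entry whose first element is 1 but which has no second element.
def Pre_th_method_AUROC (prediction_actual_list : List (List Int)) : Prop :=
  ∀ e ∈ prediction_actual_list, 1 ≤ e.length ∧ (e.getD 0 0 = 1 → 2 ≤ e.length)
instance (prediction_actual_list : List (List Int)) : Decidable (Pre_th_method_AUROC prediction_actual_list) := by unfold Pre_th_method_AUROC; infer_instance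

def pvWitness_th_method_AUROC : List (List Int) := [[1, 1], [1, 0], [0, 1], [0, 0], [2, 5]]

def Spec_th_method_AUROC (prediction_actual_list : List (List Int)) (out : List (List Int)) : Prop := out = th_method_AUROC_alt prediction_actual_list
instance (prediction_actual_list : List (List Int)) (out : List (List Int)) : Decidable (Spec_th_method_AUROC prediction_actual_list out) := by unfold Spec_th_method_AUROC; infer_instance

-- ===== CLAIM (what is proved, stated in full; the proofs are below) =====
def Claim_equal_th_method_AUROC : Prop := ∀ (prediction_actual_list : List (List Int)), Dom_th_method_AUROC prediction_actual_list → Pre_th_method_AUROC prediction_actual_list → Spec_th_method_AUROC prediction_actual_list (th_method_AUROC prediction_actual_list)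

-- ===== LEMMAS AND PROOFS =====

-- Reference cumulative-count list, used only by the proofs to relate the two ports.
def roc : List (List Int) → Int → Int → List (List Int)
  | [], _, _ => []
  | e :: t, tp, fp =>
    if PySem.List.pyGetD e 0 0 = 1 ∧ PySem.List.pyGetD e 1 0 = 1 then
      [tp + 1, fp] :: roc t (tp + 1) fp
    else if PySem.List.pyGetD e 0 0 = 1 ∧ PySem.List.pyGetD e 1 0 = 0 then
      [tp, fp + 1] :: roc t tp (fp + 1)
    else
      [tp, fp] :: roc t tp fp

-- total tp / fp increments of a list
def rocT : List (List Int) → Int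
  | [] => 0
  | e :: t => (if PySem.List.pyGetD e 0 0 = 1 ∧ PySem.List.pyGetD e 1 0 = 1 then 1 else 0) + rocT t
def rocF : List (List Int) → Int
  | [] => 0
  | e :: t => (if PySem.List.pyGetD e 0 0 = 1 ∧ PySem.List.pyGetD e 1 0 = 0 then 1 else 0) + rocF t

theorem roc_length (l : List (List Int)) (tp fp : Int) : (roc l tp fp).length = l.length := by
  induction l generalizing tp fp with
  | nil => rfl
  | cons e t ih => simp only [roc]; split_ifs <;> simp [ih]

theorem pyGetD_pair0 (a b : Int) : PySem.List.pyGetD [a, b] 0 0 = a := by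
  simp [PySem.List.pyGetD, PySem.List.pyGet?, PySem.List.pyIdx?]
theorem pyGetD_pair1 (a b : Int) : PySem.List.pyGetD [a, b] 1 0 = b := by
  simp [PySem.List.pyGetD, PySem.List.pyGet?, PySem.List.pyIdx?]

theorem roc_shift (l : List (List Int)) (tp fp d e : Int) :
    roc l (tp + d) (fp + e)
      = (roc l tp fp).map (fun p => [PySem.List.pyGetD p 0 0 + d, PySem.List.pyGetD p 1 0 + e]) := by
  induction l generalizing tp fp with
  | nil => rfl
  | cons x t ih =>
    simp only [roc]
    split_ifs with h1 h2 <;> simp only [List.map_cons, pyGetD_pair0, pyGetD_pair1]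
    all_goals rw [← ih]
    all_goals try ring_nf

theorem roc_append (a b : List (List Int)) (tp fp : Int) :
    roc (a ++ b) tp fp = roc a tp fp ++ roc b (tp + rocT a) (fp + rocF a) := by
  induction a generalizing tp fp with
  | nil => simp [roc, rocT, rocF]
  | cons x t ih =>
    simp only [List.cons_append, roc, rocT, rocF]
    split_ifs <;> simp only [ih, List.cons_append] <;>
      first
        | (exfalso; omega)
        | rfl
        | (congr 2 <;> ring)

theorem roc_last (a : List (List Int)) (h : a ≠ []) (tp fp : Int) :
    PySem.List.pyGetD (roc a tp fp) (-1) [] = [tp + rocT a, fp + rocF a] := by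
  induction a generalizing tp fp with
  | nil => exact absurd rfl h
  | cons x t ih =>
    by_cases ht : t = []
    · subst ht
      simp only [roc, rocT, rocF]
      split_ifs <;>
        first
          | (exfalso; omega)
          | (rw [PySem.List.pyGetD_neg_one _ _ (List.cons_ne_nil _ _)]
             simp only [List.getLast_singleton]
             congr 1 <;> ring)
    · have hroc : ∀ tp' fp' : Int, roc t tp' fp' ≠ [] := by
        intro tp' fp' hc
        have := roc_length t tp' fp'
        rw [hc] at this
        exact ht (List.eq_nil_of_length_eq_zero this.symm)
      simp only [roc, rocT, rocF]
      split_ifs <;>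
        first
          | (exfalso; omega)
          | (rw [PySem.List.pyGetD_neg_one _ _ (List.cons_ne_nil _ _),
                List.getLast_cons (hroc _ _),
                ← PySem.List.pyGetD_neg_one _ _ (hroc _ _), ih ht]
             congr 1 <;> ring)

-- A computes roc l 0 0
theorem foldA_eq_roc (l : List (List Int)) (acc : List (List Int)) (tp fp : Int) :
    (l.foldl
      (fun (st : List (List Int) × Int × Int) row =>
        if PySem.List.pyGetD row 0 0 = 1 ∧ PySem.List.pyGetD row 1 0 = 1 then
          (st.1 ++ [[st.2.1 + 1, st.2.2]], st.2.1 + 1, st.2.2)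
        else if PySem.List.pyGetD row 0 0 = 1 ∧ PySem.List.pyGetD row 1 0 = 0 then
          (st.1 ++ [[st.2.1, st.2.2 + 1]], st.2.1, st.2.2 + 1)
        else
          (st.1 ++ [[st.2.1, st.2.2]], st.2.1, st.2.2)) (acc, tp, fp)).1
      = acc ++ roc l tp fp := by
  induction l generalizing acc tp fp with
  | nil => simp [roc]
  | cons x t ih =>
    simp only [List.foldl_cons, roc]
    split_ifs <;> simp [ih]

theorem A_eq_roc (l : List (List Int)) : th_method_AUROC l = roc l 0 0 := by
  unfold th_method_AUROC
  rw [PySem.List.foldl_pyRange_zero_pyGetD l []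
      (fun (st : List (List Int) × Int × Int) row =>
        if PySem.List.pyGetD row 0 0 = 1 ∧ PySem.List.pyGetD row 1 0 = 1 then
          (st.1 ++ [[st.2.1 + 1, st.2.2]], st.2.1 + 1, st.2.2)
        else if PySem.List.pyGetD row 0 0 = 1 ∧ PySem.List.pyGetD row 1 0 = 0 then
          (st.1 ++ [[st.2.1, st.2.2 + 1]], st.2.1, st.2.2 + 1)
        else
          (st.1 ++ [[st.2.1, st.2.2]], st.2.1, st.2.2))
      ([], 0, 0)]
  simpa using foldA_eq_roc l [] 0 0

-- B computes roc l 0 0 as well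
theorem B_eq_roc (l : List (List Int)) : th_method_AUROC_alt l = roc l 0 0 := by
  induction hn : l.length using Nat.strong_induction_on generalizing l with
  | _ n ih =>
  subst hn
  by_cases h0 : l = []
  · subst h0
    rw [th_method_AUROC_alt]
    simp [PySem.List.len_eq, roc]
  · have hc0 : ¬ (PySem.List.len l = 0) := by
      simp only [PySem.List.len_eq]
      simpa using h0
    by_cases h1 : l.length = 1
    · obtain ⟨e, rfl⟩ := List.length_eq_one_iff.mp h1
      rw [th_method_AUROC_alt]
      simp only [PySem.List.len_eq, List.length_singleton, Nat.cast_one,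
        one_ne_zero, dite_false, dite_true, PySem.List.pyGetD_zero_cons, roc]
      split_ifs <;> simp_all
    · have hc1 : ¬ (PySem.List.len l = 1) := by
        simp only [PySem.List.len_eq]
        exact_mod_cast h1
      have hlen : 2 ≤ l.length := by
        have : l.length ≠ 0 := fun hz => h0 (List.eq_nil_of_length_eq_zero hz)
        omega
      rw [th_method_AUROC_alt, dif_neg hc0, dif_neg hc1]
      have hmid : PySem.Int.floordiv (PySem.List.len l) 2 = ((l.length / 2 : Nat) : Int) := by
        simpa [PySem.List.len_eq] using (PySem.Int.floordiv_natCast l.length 2)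
      rw [hmid]
      simp only [PySem.List.slice_to_natCast, PySem.List.slice_from_natCast]
      have hk1 : 1 ≤ l.length / 2 := by omega
      have hk2 : l.length / 2 < l.length := by omega
      have hA : th_method_AUROC_alt (l.take (l.length / 2)) = roc (l.take (l.length / 2)) 0 0 :=
        ih _ (lt_of_le_of_lt (List.length_take_le _ _) hk2) _ rfl
      have hB : th_method_AUROC_alt (l.drop (l.length / 2)) = roc (l.drop (l.length / 2)) 0 0 :=
        ih _ (by rw [List.length_drop]; omega) _ rfl
      rw [hA, hB]
      have htake_ne : l.take (l.length / 2) ≠ [] := by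
        intro hc
        have h' := congrArg List.length hc
        rw [List.length_take] at h'
        simp only [List.length_nil] at h'
        omega
      rw [roc_last _ htake_ne, pyGetD_pair0, pyGetD_pair1]
      conv_rhs => rw [← List.take_append_drop (l.length / 2) l]
      rw [roc_append, roc_shift]
      simp only [zero_add]

-- ===== VERDICT (by name: the statement is the Claim_ definition above) =====
theorem th_method_AUROC_spec : Claim_equal_th_method_AUROC := by
  intro l _ _
  unfold Spec_th_method_AUROC
  rw [A_eq_roc, B_eq_roc]
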